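-- pv_equiv track=rewrite | github.com/infojunkie/mma | MMA/harmony.py | gethnote
-- ===== SOURCE A (Python) =====
-- def gethnote(note, chord):
--     """ Determine harmony notes for a note based on the chord.
--
--         note - midi value of the note
--
--         chord - list of midi values for the chord
--
--
--         This routine works by creating a chord list with all
--         its notes having a value less than the note (remember, this
--         is all in MIDI values). We then grab notes from the end of
--         the chord until one is found which is less than the original
--         note.
--     """
--
--     ch = chord[:] # we're buggering the chord octave, so copy the list
--
--
--     # Note: did a test and none of my files seem to be triggering both of the
--     # the following conditions.
--     # If 1st note in chord is > basenote then we know all notes in chord are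
--     # above the basenote. Lower the chord
--     while ch[-1] > note:
--         ch = [x-12 for x in ch]
--     # Ensure the highest note in the chord is in octave range
--     while ch[-1]+12 < note:
--         ch = [x+12 for x in ch]
--
--     # get a note from the chord which is
--     # less than the current note. Just step
--     # until the chord note is >= 'note' and
--     # use the previous If the note is the chord's
--     # root we actually return the root note. We
--     # do have to return something.
--
--     h = ch[0]
--     for i in ch:
--         if i >= note:
--             break
--         else:
--             h = i
--
--     return h
-- ===== SOURCE B (Python) =====
-- def gethnote(note, chord):
--     # Closed-form octave offset replacing A's two while-loops, then an index
--     # search for the first chord note >= note instead of A's accumulator scan.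
--     d = note - chord[-1]
--     if d < 0:
--         off = 12 * (d // 12)
--     elif d > 12:
--         off = 12 * ((d - 1) // 12)
--     else:
--         off = 0
--     j = next((k for k, x in enumerate(chord) if x + off >= note), len(chord))
--     if j > 0:
--         return chord[j - 1] + off
--     return chord[0] + off
-- ===== Notes on version B (the rewrite author's own statement) =====
-- stated objective: faster
-- what changed: Replaces A's two octave-shifting while-loops (each pass rebuilds the whole chord list) by a closed-form floor-division offset applied once, and A's accumulator scan by a search for the first index whose shifted note reaches the target.
import Mathlib
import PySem

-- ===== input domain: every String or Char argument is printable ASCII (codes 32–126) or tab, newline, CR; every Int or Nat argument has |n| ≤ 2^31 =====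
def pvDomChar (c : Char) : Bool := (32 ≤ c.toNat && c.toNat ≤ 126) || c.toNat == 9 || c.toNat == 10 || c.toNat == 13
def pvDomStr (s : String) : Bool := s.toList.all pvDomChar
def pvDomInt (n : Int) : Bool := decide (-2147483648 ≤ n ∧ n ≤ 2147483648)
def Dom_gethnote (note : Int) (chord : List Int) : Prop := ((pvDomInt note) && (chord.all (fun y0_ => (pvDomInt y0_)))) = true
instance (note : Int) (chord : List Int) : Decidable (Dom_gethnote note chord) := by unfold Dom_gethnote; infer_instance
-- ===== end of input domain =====

-- B replaces A's two octave-shifting while-loops (each pass rebuilds the list) by a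
-- closed-form offset computed once, and the accumulator scan by an index search (objective: faster).

-- ===== PORT A =====
-- 'while ch[-1] > note: ch = [x-12 for x in ch]'; the 'none' branch is Python's
-- IndexError on an empty chord, excluded by Pre_.
def gethnoteLower (note : Int) (ch : List Int) : List Int :=
  match h : PySem.List.pyGet? ch (-1) with
  | none => ch
  | some l =>
    if hl : l > note then gethnoteLower note (ch.map (fun x => x - 12)) else ch
termination_by (((PySem.List.pyGet? ch (-1)).getD 0) - note).toNat
decreasing_by
  simp only [PySem.List.pyGet?_neg_one] at h ⊢
  simp [List.getLast?_map, h]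
  omega

-- 'while ch[-1]+12 < note: ch = [x+12 for x in ch]'
def gethnoteRaise (note : Int) (ch : List Int) : List Int :=
  match h : PySem.List.pyGet? ch (-1) with
  | none => ch
  | some l =>
    if hl : l + 12 < note then gethnoteRaise note (ch.map (fun x => x + 12)) else ch
termination_by (note - ((PySem.List.pyGet? ch (-1)).getD 0)).toNat
decreasing_by
  simp only [PySem.List.pyGet?_neg_one] at h ⊢
  simp [List.getLast?_map, h]
  omega

-- 'h = ch[0]; for i in ch: if i >= note: break else: h = i'
def gethnoteScan (note : Int) (h : Int) : List Int → Int
  | [] => h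
  | i :: rest => if i ≥ note then h else gethnoteScan note i rest

def gethnote (note : Int) (chord : List Int) : Int :=
  let ch := gethnoteRaise note (gethnoteLower note chord)
  gethnoteScan note ((PySem.List.pyGet? ch 0).getD 0) ch

-- ===== PORT B =====
def gethnote_alt (note : Int) (chord : List Int) : Int :=
  let d := note - (PySem.List.pyGet? chord (-1)).getD 0
  let off : Int :=
    if d < 0 then 12 * PySem.Int.floordiv d 12
    else if d > 12 then 12 * PySem.Int.floordiv (d - 1) 12
    else 0
  let j := (chord.findIdx? (fun x => x + off ≥ note)).getD chord.length
  if j > 0 then (PySem.List.pyGet? chord ((j : Int) - 1)).getD 0 + off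
  else (PySem.List.pyGet? chord 0).getD 0 + off

-- ===== PRECONDITION & SPEC =====
-- A raises IndexError on an empty chord (ch[-1]); Pre_ excludes only that.
def Pre_gethnote (note : Int) (chord : List Int) : Prop := chord ≠ []
instance (note : Int) (chord : List Int) : Decidable (Pre_gethnote note chord) := by
  unfold Pre_gethnote; infer_instance

def pvWitness_gethnote : Int × List Int := (64, [48, 52, 55])

def Spec_gethnote (note : Int) (chord : List Int) (out : Int) : Prop := out = gethnote_alt note chord
instance (note : Int) (chord : List Int) (out : Int) : Decidable (Spec_gethnote note chord out) := by unfold Spec_gethnote; infer_instance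

-- ===== CLAIM (what is proved, stated in full; the proofs are below) =====
def Claim_equal_gethnote : Prop := ∀ (note : Int) (chord : List Int), Dom_gethnote note chord → Pre_gethnote note chord → Spec_gethnote note chord (gethnote note chord)

-- ===== LEMMAS AND PROOFS =====

theorem lower_spec (note : Int) : ∀ (n : Nat) (ch : List Int) (l : Int),
    ch.getLast? = some l → (l - note).toNat ≤ n →
    gethnoteLower note ch =
      if l > note then ch.map (fun x => x + 12 * PySem.Int.floordiv (note - l) 12) else ch := by
  intro n
  induction n with
  | zero =>
    intro ch l hl hb
    rw [gethnoteLower, PySem.List.pyGet?_neg_one, hl]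
    dsimp only
    have hle : ¬ l > note := by omega
    rw [dif_neg hle, if_neg hle]
  | succ n ih =>
    intro ch l hl hb
    rw [gethnoteLower, PySem.List.pyGet?_neg_one, hl]
    dsimp only
    by_cases hgt : l > note
    · rw [dif_pos hgt, if_pos hgt]
      have hl' : (ch.map (fun x => x - 12)).getLast? = some (l - 12) := by
        simp [List.getLast?_map, hl]
      rw [ih _ _ hl' (by omega)]
      by_cases h2 : l - 12 > note
      · rw [if_pos h2, List.map_map]
        congr 1
        funext x
        simp only [Function.comp]
        rw [PySem.Int.floordiv_eq_ediv_of_pos (by norm_num),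
            PySem.Int.floordiv_eq_ediv_of_pos (by norm_num)]
        omega
      · rw [if_neg h2]
        congr 1
        funext x
        rw [PySem.Int.floordiv_eq_ediv_of_pos (by norm_num)]
        omega
    · rw [dif_neg hgt, if_neg hgt]

theorem raise_spec (note : Int) : ∀ (n : Nat) (ch : List Int) (l : Int),
    ch.getLast? = some l → (note - l).toNat ≤ n →
    gethnoteRaise note ch =
      if l + 12 < note then ch.map (fun x => x + 12 * PySem.Int.floordiv (note - l - 1) 12) else ch := by
  intro n
  induction n with
  | zero =>
    intro ch l hl hb
    rw [gethnoteRaise, PySem.List.pyGet?_neg_one, hl]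
    dsimp only
    have hle : ¬ l + 12 < note := by omega
    rw [dif_neg hle, if_neg hle]
  | succ n ih =>
    intro ch l hl hb
    rw [gethnoteRaise, PySem.List.pyGet?_neg_one, hl]
    dsimp only
    by_cases hgt : l + 12 < note
    · rw [dif_pos hgt, if_pos hgt]
      have hl' : (ch.map (fun x => x + 12)).getLast? = some (l + 12) := by
        simp [List.getLast?_map, hl]
      rw [ih _ _ hl' (by omega)]
      by_cases h2 : l + 12 + 12 < note
      · rw [if_pos h2, List.map_map]
        congr 1
        funext x
        simp only [Function.comp]
        rw [PySem.Int.floordiv_eq_ediv_of_pos (by norm_num),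
            PySem.Int.floordiv_eq_ediv_of_pos (by norm_num)]
        omega
      · rw [if_neg h2]
        congr 1
        funext x
        rw [PySem.Int.floordiv_eq_ediv_of_pos (by norm_num)]
        omega
    · rw [dif_neg hgt, if_neg hgt]

theorem scan_spec (note : Int) : ∀ (xs : List Int) (h0 : Int),
    gethnoteScan note h0 xs =
      match xs.findIdx? (fun i => decide (i ≥ note)) with
      | some 0 => h0
      | some (k+1) => xs.getD k 0
      | none => xs.getLast?.getD h0 := by
  intro xs
  induction xs with
  | nil => intro h0; simp [gethnoteScan]
  | cons a rest ih =>
    intro h0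
    rw [List.findIdx?_cons]
    by_cases ha : a ≥ note
    · simp [gethnoteScan, ha]
    · have hlhs : gethnoteScan note h0 (a :: rest) = gethnoteScan note a rest := by
        simp [gethnoteScan, ha]
      rw [hlhs, ih a]
      have hpa : decide (a ≥ note) = false := by simp [ha]
      simp only [hpa, Bool.false_eq_true, if_false]
      cases hf : rest.findIdx? (fun i => decide (i ≥ note)) with
      | none =>
        simp only [Option.map_none]
        cases rest with
        | nil => simp
        | cons b t => simp [List.getLast?_cons]
      | some m =>
        simp only [Option.map_some]
        cases m with
        | zero => simp
        | succ k => simp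

-- ===== VERDICT (by name: the statement is the Claim_ definition above) =====
-- the shift loops of A compute exactly B's closed-form offset
theorem shift_eq_map_off (note : Int) (chord : List Int) (l : Int)
    (hl : chord.getLast? = some l) :
    gethnoteRaise note (gethnoteLower note chord) =
      chord.map (fun x => x +
        (if note - l < 0 then 12 * PySem.Int.floordiv (note - l) 12
         else if note - l > 12 then 12 * PySem.Int.floordiv (note - l - 1) 12
         else 0)) := by
  rcases lt_trichotomy (note - l) 0 with hd | hd | hd
  · -- note < l : lower loop fires, raise loop does not
    rw [lower_spec note (l - note).toNat chord l hl le_rfl, if_pos (by omega)]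
    have ho : 12 * PySem.Int.floordiv (note - l) 12 = 12 * ((note - l) / 12) := by
      rw [PySem.Int.floordiv_eq_ediv_of_pos (by norm_num)]
    set o1 : Int := 12 * PySem.Int.floordiv (note - l) 12 with ho1
    have hl' : (chord.map (fun x => x + o1)).getLast? = some (l + o1) := by
      simp [List.getLast?_map, hl]
    rw [raise_spec note (note - (l + o1)).toNat _ _ hl' le_rfl, if_neg (by omega)]
    rw [if_pos hd]
  · -- note = l : neither loop fires, offset 0
    rw [lower_spec note (l - note).toNat chord l hl le_rfl, if_neg (by omega)]
    rw [raise_spec note (note - l).toNat chord l hl le_rfl, if_neg (by omega)]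
    rw [if_neg (by omega), if_neg (by omega)]
    simp
  · -- note > l
    rw [lower_spec note (l - note).toNat chord l hl le_rfl, if_neg (by omega)]
    rw [raise_spec note (note - l).toNat chord l hl le_rfl]
    by_cases h12 : note - l > 12
    · rw [if_pos (by omega), if_neg (by omega), if_pos h12]
    · rw [if_neg (by omega), if_neg (by omega), if_neg h12]
      simp

theorem gethnote_spec : Claim_equal_gethnote := by
  intro note chord _ hpre
  unfold Spec_gethnote
  obtain ⟨l, hl⟩ : ∃ l, chord.getLast? = some l := by
    cases h : chord.getLast? with
    | none => exact absurd (List.getLast?_eq_none_iff.mp h) hpre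
    | some l => exact ⟨l, rfl⟩
  set off : Int :=
    (if note - l < 0 then 12 * PySem.Int.floordiv (note - l) 12
     else if note - l > 12 then 12 * PySem.Int.floordiv (note - l - 1) 12
     else 0) with hoff
  have hA : gethnote note chord =
      gethnoteScan note ((PySem.List.pyGet? (chord.map (fun x => x + off)) 0).getD 0)
        (chord.map (fun x => x + off)) := by
    unfold gethnote
    rw [shift_eq_map_off note chord l hl]
  have hB : gethnote_alt note chord =
      (let j := (chord.findIdx? (fun x => decide (x + off ≥ note))).getD chord.length;
       if j > 0 then (PySem.List.pyGet? chord ((j : Int) - 1)).getD 0 + off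
       else (PySem.List.pyGet? chord 0).getD 0 + off) := by
    unfold gethnote_alt
    rw [PySem.List.pyGet?_neg_one, hl]
    rfl
  rw [hA, hB, scan_spec]
  have hfind : (chord.map (fun x => x + off)).findIdx? (fun i => decide (i ≥ note)) =
      chord.findIdx? (fun x => decide (x + off ≥ note)) := by
    rw [List.findIdx?_map]
    rfl
  rw [hfind]
  obtain ⟨c, rest, rfl⟩ : ∃ c rest, chord = c :: rest := by
    cases chord with
    | nil => exact absurd rfl hpre
    | cons c rest => exact ⟨c, rest, rfl⟩
  cases hf : (c :: rest).findIdx? (fun x => decide (x + off ≥ note)) with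
  | none =>
    simp only [Option.getD_none]
    have hj : (c :: rest).length > 0 := by simp
    rw [if_pos hj]
    have hlast : (List.map (fun x => x + off) (c :: rest)).getLast? = some (l + off) := by
      rw [List.getLast?_map, hl]
      rfl
    rw [hlast]
    have hidx : PySem.List.pyGet? (c :: rest) (((c :: rest).length : Int) - 1) =
        some l := by
      have h1 : (((c :: rest).length : Int) - 1) = (((c :: rest).length - 1 : Nat) : Int) := by
        simp
      rw [h1, PySem.List.pyGet?_natCast, ← List.getLast?_eq_getElem?, hl]
    rw [hidx]
    rfl
  | some m =>
    have hm : m < (c :: rest).length := by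
      have := List.findIdx?_eq_some_iff_findIdx_eq.mp hf
      omega
    simp only [Option.getD_some]
    cases m with
    | zero =>
      rw [if_neg (by omega)]
      simp
    | succ k =>
      rw [if_pos (by omega)]
      have h1 : (((k + 1 : Nat) : Int) - 1) = ((k : Nat) : Int) := by push_cast; ring
      rw [h1, PySem.List.pyGet?_natCast]
      have hk : k < (c :: rest).length := by omega
      rw [List.getElem?_eq_getElem hk]
      simp only [Option.getD_some]
      rw [List.getD_eq_getElem _ _ (by simpa using hk)]
      rw [List.getElem_map]
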